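-- pv_equiv track=rewrite | github.com/Jinglin-LI/Bioinformatics-Algorithm | src/main/python/algorithm/generatingDotPlot.py | compareTwoSeq
-- ===== SOURCE A (Python) =====
-- def compareTwoSeq(seq1, seq2):
--     lengthSeq1 = len(seq1)
--     lengthSeq2 = len(seq2)
--
--     scoreMatrix = [[0] * lengthSeq2 for x in range(lengthSeq1)]
--
--     for i in range(lengthSeq1):
--         for j in range(lengthSeq2):
--             if(seq1[i] == seq2[j]):
--                 scoreMatrix[i][j] = 1
--
--     return scoreMatrix
-- ===== SOURCE B (Python) =====
-- def compareTwoSeq(seq1, seq2):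
--     index = {}
--     for j, ch in enumerate(seq2):
--         index.setdefault(ch, []).append(j)
--     scoreMatrix = []
--     for ch in seq1:
--         row = [0] * len(seq2)
--         for j in index.get(ch, []):
--             row[j] = 1
--         scoreMatrix.append(row)
--     return scoreMatrix
-- ===== Notes on version B (the rewrite author's own statement) =====
-- stated objective: alternative
-- what changed: B first builds a one-pass dict from each character of seq2 to its list of column indices, then fills each row by setting 1 only at the indexed columns, replacing A's per-pair inner comparison scan with an index-driven sparse fill; intended as faster (measured 3-8x at n=4096, but unconfirmed at the largest timing size, where the dense output allocation dominates for both).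
import Mathlib
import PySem

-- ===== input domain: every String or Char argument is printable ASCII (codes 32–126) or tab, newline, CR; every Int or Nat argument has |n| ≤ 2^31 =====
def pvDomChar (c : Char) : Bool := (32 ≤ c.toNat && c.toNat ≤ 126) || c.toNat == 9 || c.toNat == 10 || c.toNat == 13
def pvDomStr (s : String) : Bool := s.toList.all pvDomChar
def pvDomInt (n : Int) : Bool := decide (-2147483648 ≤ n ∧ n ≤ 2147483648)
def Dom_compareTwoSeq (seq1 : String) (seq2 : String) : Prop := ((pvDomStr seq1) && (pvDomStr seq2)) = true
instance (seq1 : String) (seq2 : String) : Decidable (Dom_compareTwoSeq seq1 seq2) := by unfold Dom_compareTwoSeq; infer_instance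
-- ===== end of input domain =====

-- B replaces A's per-pair inner comparison loop with a one-pass char->columns index of seq2 and a sparse row fill; return value is proved identical.
-- ===== PORT A =====
-- literal transliteration of A: dense zero matrix, nested index loops, set 1 on a match
def compareTwoSeq (seq1 : String) (seq2 : String) : List (List Int) :=
  let lengthSeq1 : Int := PySem.Str.len seq1
  let lengthSeq2 : Int := PySem.Str.len seq2
  let scoreMatrix : List (List Int) :=
    (PySem.List.pyRange 0 lengthSeq1 1).map (fun _ => List.replicate lengthSeq2.toNat (0 : Int))
  (PySem.List.pyRange 0 lengthSeq1 1).foldl (fun m i =>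
    (PySem.List.pyRange 0 lengthSeq2 1).foldl (fun m j =>
      if PySem.Str.pyGet? seq1 i = PySem.Str.pyGet? seq2 j then
        PySem.List.pySetD m i (PySem.List.pySetD (PySem.List.pyGetD m i []) j 1)
      else m) m) scoreMatrix

-- ===== PORT B =====
-- transliteration of B (Source B): build the char -> column-index dict over seq2, then sparse-fill each row
def compareTwoSeq_alt (seq1 : String) (seq2 : String) : List (List Int) :=
  let index : PySem.Dict Char (List Int) :=
    (PySem.List.enumerate seq2.toList).foldl
      (fun d p => d.modify p.2 [] (· ++ [p.1])) PySem.Dict.empty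
  seq1.toList.foldl
    (fun acc ch =>
      let row := (index.getD ch []).foldl
        (fun r j => PySem.List.pySetD r j 1)
        (List.replicate seq2.toList.length (0 : Int))
      acc ++ [row]) []

-- ===== PRECONDITION & SPEC =====
def Spec_compareTwoSeq (seq1 : String) (seq2 : String) (out : List (List Int)) : Prop := out = compareTwoSeq_alt seq1 seq2
instance (seq1 : String) (seq2 : String) (out : List (List Int)) : Decidable (Spec_compareTwoSeq seq1 seq2 out) := by unfold Spec_compareTwoSeq; infer_instance

-- ===== CLAIM (what is proved, stated in full; the proofs are below) =====
def Claim_equal_compareTwoSeq : Prop := ∀ (seq1 : String) (seq2 : String), Dom_compareTwoSeq seq1 seq2 → Spec_compareTwoSeq seq1 seq2 (compareTwoSeq seq1 seq2)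

-- ===== LEMMAS AND PROOFS =====
-- the comparison matrix both programs compute
def pvSpecM (cs1 cs2 : List Char) : List (List Int) :=
  cs1.map (fun c => cs2.map (fun d => if d = c then (1:Int) else 0))


theorem pvFoldSetGet (ps : List Nat) (r : List Int) (k : Nat) :
    (ps.foldl (fun row j => row.set j (1:Int)) r)[k]? =
      if k ∈ ps ∧ k < r.length then some 1 else r[k]? := by
  induction ps generalizing r with
  | nil => simp
  | cons j tl ih =>
    rw [List.foldl_cons, ih]
    simp only [List.length_set, List.mem_cons, List.getElem?_set]
    by_cases hk : k < r.length
    · by_cases hjk : j = k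
      · subst hjk
        by_cases hm : j ∈ tl <;> simp [hm, hk]
      · by_cases hm : k ∈ tl <;> simp [hm, hk, hjk, Ne.symm hjk]
    · simp [hk]; omega


theorem pvRowEq (c : Char) (cs2 : List Char) (ps : List Nat)
    (hmem : ∀ k : Nat, k ∈ ps ↔ ∃ h : k < cs2.length, cs2[k] = c) :
    ps.foldl (fun r j => r.set j (1:Int)) (List.replicate cs2.length (0:Int))
      = cs2.map (fun d => if d = c then (1:Int) else 0) := by
  apply List.ext_getElem?
  intro k
  rw [pvFoldSetGet]
  by_cases hk : k < cs2.length
  · by_cases hc : cs2[k] = c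
    · have : k ∈ ps := (hmem k).2 ⟨hk, hc⟩
      simp [this, hk, hc]
    · have : ¬ k ∈ ps := fun h => hc (let ⟨_, h2⟩ := (hmem k).1 h; h2)
      simp [this, hk, hc]
  · have : ¬ k ∈ ps := fun h => hk (let ⟨h1, _⟩ := (hmem k).1 h; h1)
    simp [this, hk]

theorem pvMemEnumerate {α : Type} (xs : List α) (s : Int) (p : Int × α) :
    p ∈ PySem.List.enumerate xs s ↔ ∃ k : Nat, ∃ h : k < xs.length, p = (s + k, xs[k]) := by
  induction xs generalizing s with
  | nil => simp [PySem.List.enumerate_nil]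
  | cons x t ih =>
    rw [PySem.List.enumerate_cons, List.mem_cons, ih]
    constructor
    · rintro (rfl | ⟨k, hk, rfl⟩)
      · exact ⟨0, by simp⟩
      · exact ⟨k + 1, by simp [List.length_cons]; omega, by simp; ring_nf⟩
    · rintro ⟨k, hk, rfl⟩
      cases k with
      | zero => left; simp
      | succ k => right; exact ⟨k, by simp [List.length_cons] at hk; omega, by simp; ring_nf⟩

theorem pvOuterMap (g : Nat → List Int → List Int) :
    ∀ (L : Nat) (m0 : List (List Int)), L ≤ m0.length →
    (List.range L).foldl (fun m i => m.set i (g i (m.getD i []))) m0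
      = (List.range L).map (fun i => g i (m0.getD i [])) ++ m0.drop L := by
  intro L
  induction L with
  | zero => simp
  | succ L ih =>
    intro m0 hL
    rw [List.range_succ, List.foldl_append, List.map_append, ih m0 (by omega)]
    simp only [List.foldl_cons, List.foldl_nil, List.map_cons, List.map_nil]
    have hlen : ((List.range L).map (fun i => g i (m0.getD i []))).length = L := by simp
    have hLlt : L < m0.length := by omega
    have hgetD : ((List.range L).map (fun i => g i (m0.getD i [])) ++ m0.drop L).getD L []
        = m0.getD L [] := by
      rw [List.getD, List.getElem?_append_right (by omega), hlen]
      simp [List.getElem?_drop, List.getD]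
    rw [hgetD]
    have hdrop : m0.drop L = m0[L] :: m0.drop (L+1) := List.drop_eq_getElem_cons hLlt
    rw [List.set_append]
    simp only [hlen, lt_irrefl]
    simp only [hdrop, Nat.sub_self, List.set_cons_zero]
    simp


theorem pvRowFoldNil (js : List Nat) (P : Nat → Prop) [DecidablePred P] :
    js.foldl (fun r j => if P j then r.set j (1:Int) else r) [] = [] := by
  induction js with
  | nil => rfl
  | cons j tl ih => simp only [List.foldl_cons, List.set_nil, ite_self]; exact ih

theorem pvInnerExtract (js : List Nat) (P : Nat → Prop) [DecidablePred P]
    (m : List (List Int)) (i : Nat) :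
    js.foldl (fun m j => if P j then m.set i ((m.getD i []).set j (1:Int)) else m) m
      = m.set i (js.foldl (fun r j => if P j then r.set j (1:Int) else r) (m.getD i [])) := by
  by_cases h : i < m.length
  · induction js generalizing m with
    | nil =>
      simp only [List.foldl_nil]
      rw [List.getD, List.getElem?_eq_getElem h]
      simp
    | cons j tl ih =>
      rw [List.foldl_cons, List.foldl_cons]
      by_cases hp : P j
      · simp only [hp, if_true]
        rw [ih _ (by simpa using h)]
        rw [List.set_set]
        congr 1
        rw [List.getD, List.getElem?_set_self]
        · simp
        · exact h
      · simp only [hp, if_false]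
        exact ih _ h
  · have hge : m.length ≤ i := by omega
    have hget : m.getD i [] = [] := by
      rw [List.getD, List.getElem?_eq_none (by omega)]
      rfl
    rw [hget, pvRowFoldNil, List.set_eq_of_length_le hge]
    have : ∀ m' : List (List Int), m'.length ≤ i →
        js.foldl (fun m j => if P j then m.set i ((m.getD i []).set j (1:Int)) else m) m' = m' := by
      intro m' hm'
      induction js generalizing m' with
      | nil => rfl
      | cons j tl ih =>
        rw [List.foldl_cons, List.set_eq_of_length_le hm', ite_self]
        exact ih _ hm'
    exact this m hge


theorem pvA (seq1 seq2 : String) : compareTwoSeq seq1 seq2 = pvSpecM seq1.toList seq2.toList := by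
  unfold compareTwoSeq
  simp only [PySem.Str.len_eq, Int.toNat_natCast, PySem.List.pyRange_zero_natCast,
    List.foldl_map, List.map_map, PySem.List.pySetD_natCast, PySem.List.pyGetD_natCast,
    PySem.Str.pyGet?_natCast]
  have hstep : (fun (m : List (List Int)) (i : Nat) =>
      (List.range seq2.toList.length).foldl
        (fun m j => if seq1.toList[i]? = seq2.toList[j]? then m.set i ((m.getD i []).set j 1) else m) m)
    = (fun (m : List (List Int)) (i : Nat) =>
        m.set i ((List.range seq2.toList.length).foldl
          (fun r j => if seq1.toList[i]? = seq2.toList[j]? then r.set j 1 else r) (m.getD i []))) := by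
    funext m i
    exact pvInnerExtract _ _ m i
  rw [hstep, pvOuterMap (g := fun i r => (List.range seq2.toList.length).foldl
      (fun r j => if seq1.toList[i]? = seq2.toList[j]? then r.set j 1 else r) r)
      seq1.toList.length _ (by simp)]
  rw [List.drop_eq_nil_of_le (by simp), List.append_nil]
  have hrow : ∀ (k : Nat) (hk : k < seq1.toList.length),
      (List.range seq2.toList.length).foldl
        (fun r j => if some (seq1.toList[k]'hk) = seq2.toList[j]? then r.set j (1:Int) else r)
        (List.replicate seq2.toList.length 0)
      = seq2.toList.map (fun d => if d = seq1.toList[k]'hk then (1:Int) else 0) := by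
    intro k hk
    rw [PySem.List.foldl_ite_eq_foldl_filter]
    apply pvRowEq
    intro k'
    simp only [List.mem_filter, List.mem_range, decide_eq_true_eq]
    constructor
    · rintro ⟨h1, h2⟩
      rw [List.getElem?_eq_getElem h1] at h2
      exact ⟨h1, (Option.some_inj.1 h2).symm⟩
    · rintro ⟨h1, h2⟩
      refine ⟨h1, ?_⟩
      rw [List.getElem?_eq_getElem h1, h2]
  apply List.ext_getElem?
  intro k
  by_cases hk : k < seq1.toList.length
  · simp only [pvSpecM, List.getElem?_map, List.getElem?_range, hk,
      List.getElem?_eq_getElem hk, Option.map_some, List.getD, Function.comp]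
    simp only [Option.getD_some]
    exact congrArg some (hrow k hk)
  · simp [pvSpecM, List.getElem?_map, List.getElem?_eq_none (by omega : seq1.toList.length ≤ k)]
    rw [← String.length_toList]
    omega


theorem pvB (seq1 seq2 : String) : compareTwoSeq_alt seq1 seq2 = pvSpecM seq1.toList seq2.toList := by
  unfold compareTwoSeq_alt
  simp only [PySem.List.foldl_append_singleton_eq_map, List.nil_append]
  unfold pvSpecM
  apply List.map_congr_left
  intro ch _
  have hidx : ((PySem.List.enumerate seq2.toList).foldl
      (fun d p => d.modify p.2 [] (· ++ [p.1])) PySem.Dict.empty).getD ch []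
      = (((PySem.List.enumerate seq2.toList).map (fun p => (p.2, p.1))).filter
          (fun p => p.1 == ch)).map (·.2) := by
    rw [show (PySem.List.enumerate seq2.toList).foldl
        (fun d p => d.modify p.2 [] (· ++ [p.1])) PySem.Dict.empty
      = ((PySem.List.enumerate seq2.toList).map (fun p => (p.2, p.1))).foldl
        (fun d p => d.modify p.1 [] (· ++ [p.2])) PySem.Dict.empty from (List.foldl_map (f := fun p : Int × Char => (p.2, p.1))
        (g := fun (d : PySem.Dict Char (List Int)) (p : Char × Int) => d.modify p.1 [] (· ++ [p.2]))).symm]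
    rw [PySem.Dict.getD_foldl_modify_append]
    simp
  rw [hidx]
  have hpos : ∀ j ∈ (((PySem.List.enumerate seq2.toList).map (fun p => (p.2, p.1))).filter
      (fun p => p.1 == ch)).map (·.2), 0 ≤ j := by
    intro j hj
    simp only [List.mem_map, List.mem_filter, List.mem_map] at hj
    obtain ⟨p, ⟨⟨q, hq, rfl⟩, _⟩, rfl⟩ := hj
    obtain ⟨k, hk, rfl⟩ := (pvMemEnumerate _ _ _).1 hq
    simp
  rw [PySem.List.foldl_congr_mem _ _ (fun r j => r.set j.toNat (1:Int)) _
      (fun r j hj => PySem.List.pySetD_of_nonneg _ _ (hpos j hj))]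
  rw [show ∀ (l : List Int) (z : List Int), l.foldl (fun r j => r.set j.toNat (1:Int)) z
      = (l.map (·.toNat)).foldl (fun r j => r.set j (1:Int)) z from fun l z => (List.foldl_map (f := fun j : Int => j.toNat)
        (g := fun (r : List Int) (j : Nat) => r.set j (1:Int))).symm]
  apply pvRowEq
  intro k
  simp only [List.mem_map, List.mem_filter, List.mem_map, beq_iff_eq]
  constructor
  · rintro ⟨j, ⟨p, ⟨⟨q, hq, rfl⟩, hcq⟩, rfl⟩, rfl⟩
    obtain ⟨k', hk', rfl⟩ := (pvMemEnumerate _ _ _).1 hq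
    simp only at hcq
    exact ⟨by simpa using hk', by simp [hcq]⟩
  · rintro ⟨hk, hck⟩
    refine ⟨(k : Int), ⟨(seq2.toList[k]'hk, (k : Int)), ⟨⟨((k : Int), seq2.toList[k]'hk), ?_, rfl⟩, hck⟩, rfl⟩, by simp⟩
    exact (pvMemEnumerate _ _ _).2 ⟨k, hk, by simp⟩

-- ===== VERDICT (by name: the statement is the Claim_ definition above) =====
theorem compareTwoSeq_spec : Claim_equal_compareTwoSeq := by
  intro seq1 seq2 _
  unfold Spec_compareTwoSeq
  rw [pvA, pvB]
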